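-- pv_equiv track=rewrite | github.com/Jirehlov/SiglusSceneScriptUtility | src/siglus_ssu/textmap.py | _dbs_ruby_arg_context
-- ===== SOURCE A (Python) =====
-- def _int_value(value, default=-1):
--     try:
--         if value is None:
--             return default
--         return int(value)
--     except Exception:
--         return default
--
-- def _dbs_ruby_arg_context(text: str, entry: dict) -> bool:
--     start = _int_value(entry.get("span_start", -1), -1)
--     if start < 0 or start >= len(text):
--         return False
--     i = start - 1
--     while i >= 0 and text[i] in (" ", "\t"):
--         i -= 1
--     if i < 0 or text[i] != "(":
--         return False
--     i -= 1
--     while i >= 0 and text[i] in (" ", "\t"):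
--         i -= 1
--     end = i + 1
--     while i >= 0 and (text[i].isalnum() or text[i] == "_"):
--         i -= 1
--     return text[i + 1 : end].casefold() == "ruby"
-- ===== SOURCE B (Python) =====
-- def _dbs_ruby_arg_context(text: str, entry: dict) -> bool:
--     start = entry.get("span_start", -1)
--     if not (0 <= start < len(text)):
--         return False
--     p = text[:start].rstrip(" \t")
--     if not p.endswith("("):
--         return False
--     p = p[:-1].rstrip(" \t")
--     return p[-4:].casefold() == "ruby" and not (
--         len(p) >= 5 and (p[-5].isalnum() or p[-5] == "_")
--     )
-- ===== Notes on version B (the rewrite author's own statement) =====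
-- stated objective: idiomatic
-- what changed: Replaced the three backward index-walking while-loops with operations on the prefix slice text[:start]: rstrip(' \t') + endswith('(') + a slice compare of the last four characters plus one identifier-boundary character check.
import Mathlib
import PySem

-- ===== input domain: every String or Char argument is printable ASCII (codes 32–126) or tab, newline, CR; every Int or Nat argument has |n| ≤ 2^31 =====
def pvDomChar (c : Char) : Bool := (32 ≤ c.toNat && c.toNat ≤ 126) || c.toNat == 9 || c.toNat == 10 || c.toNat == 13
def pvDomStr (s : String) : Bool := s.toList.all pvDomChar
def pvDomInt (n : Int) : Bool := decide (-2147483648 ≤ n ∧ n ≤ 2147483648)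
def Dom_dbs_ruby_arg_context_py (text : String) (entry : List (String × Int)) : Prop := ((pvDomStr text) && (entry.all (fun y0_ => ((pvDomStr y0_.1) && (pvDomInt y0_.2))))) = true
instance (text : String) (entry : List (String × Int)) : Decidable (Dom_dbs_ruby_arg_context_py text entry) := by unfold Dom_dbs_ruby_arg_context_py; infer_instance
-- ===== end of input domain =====

-- B replaces A's three backward index-walking while-loops with rstrip/endswith/slice operations
-- on the prefix text[:start] plus one identifier-boundary check (objective: idiomatic; same cost).
-- ===== PORT A =====
-- port of _int_value: under the typed signature (entry : List (String × Int)) the looked-up value is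
-- always an Int (never None), and int() on an int is the identity, so no branch of the try fires.
def pvIntValue (value : Int) (_default : Int) : Int := value

-- the shared shape of A's three backward while-loops: 'while i >= 0 and q(text[i]): i -= 1'
def pvSkip (cs : List Char) (q : Char → Bool) (i : Int) : Int :=
  if 0 ≤ i ∧ (PySem.List.pyGet? cs i).any q = true then pvSkip cs q (i - 1) else i
termination_by (i + 1).toNat
decreasing_by omega

def pvIsWsA (c : Char) : Bool := c == ' ' || c == '\t'      -- text[i] in (" ", "\t")
def pvIsIdentA (c : Char) : Bool := PySem.Chars.isalnum c || c == '_'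

-- casefold() is ported as Chars.lower: exact on the ASCII domain Dom_ admits
def dbs_ruby_arg_context_py (text : String) (entry : List (String × Int)) : Bool :=
  let cs := text.toList
  let start := pvIntValue (PySem.Dict.getD (PySem.Dict.mk entry) "span_start" (-1)) (-1)
  if start < 0 ∨ (cs.length : Int) ≤ start then false
  else
    let i1 := pvSkip cs pvIsWsA (start - 1)
    if i1 < 0 ∨ ¬ ((PySem.List.pyGet? cs i1).any (· == '(') = true) then false
    else
      let i2 := pvSkip cs pvIsWsA (i1 - 1)
      let e := i2 + 1
      let i3 := pvSkip cs pvIsIdentA i2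
      PySem.Chars.lower (PySem.List.slice cs (some (i3 + 1)) (some e)) == "ruby".toList

-- ===== PORT B =====
-- hand port of p.rstrip(" \t") (PySem has no two-sided-chars rstrip); exact: drop trailing ' '/'\t'
def pvRstripWT (p : List Char) : List Char :=
  (p.reverse.dropWhile (fun c => c == ' ' || c == '\t')).reverse

def pvIsIdentB (c : Char) : Bool := PySem.Chars.isalnum c || c == '_'

-- casefold() is ported as Chars.lower: exact on the ASCII domain Dom_ admits
def dbs_ruby_arg_context_py_alt (text : String) (entry : List (String × Int)) : Bool :=
  let cs := text.toList
  let start := PySem.Dict.getD (PySem.Dict.mk entry) "span_start" (-1)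
  if ¬ (0 ≤ start ∧ start < (cs.length : Int)) then false
  else
    let p0 := pvRstripWT (PySem.List.slice cs none (some start))
    if ¬ (PySem.Chars.endswith p0 ['('] = true) then false
    else
      let p := pvRstripWT (PySem.List.slice p0 none (some (-1)))
      (PySem.Chars.lower (PySem.List.slice p (some (-4)) none) == "ruby".toList)
        && !(decide (5 ≤ p.length) && (PySem.List.pyGet? p (-5)).any pvIsIdentB)

-- ===== PRECONDITION & SPEC =====
def Spec_dbs_ruby_arg_context_py (text : String) (entry : List (String × Int)) (out : Bool) : Prop := out = dbs_ruby_arg_context_py_alt text entry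
instance (text : String) (entry : List (String × Int)) (out : Bool) : Decidable (Spec_dbs_ruby_arg_context_py text entry out) := by unfold Spec_dbs_ruby_arg_context_py; infer_instance

-- ===== CLAIM (what is proved, stated in full; the proofs are below) =====
def Claim_equal_dbs_ruby_arg_context_py : Prop := ∀ (text : String) (entry : List (String × Int)), Dom_dbs_ruby_arg_context_py text entry → Spec_dbs_ruby_arg_context_py text entry (dbs_ruby_arg_context_py text entry)

-- ===== LEMMAS AND PROOFS =====

-- A's backward whitespace/identifier walk, characterised on the reversed prefix
theorem pvSkip_spec (cs : List Char) (q : Char → Bool) :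
    ∀ (n : Nat), n ≤ cs.length →
      pvSkip cs q ((n : Int) - 1)
        = (n : Int) - 1 - (((cs.take n).reverse.takeWhile q).length : Int) := by
  intro n
  induction n with
  | zero => intro _; rw [pvSkip]; simp
  | succ n ih =>
    intro hn
    have hn' : n < cs.length := hn
    have hcast : ((n + 1 : Nat) : Int) - 1 = (n : Int) := by push_cast; ring
    have hget : PySem.List.pyGet? cs (((n + 1 : Nat) : Int) - 1) = some cs[n] := by
      rw [hcast, PySem.List.pyGet?_natCast, List.getElem?_eq_getElem hn']
    have htk : (cs.take (n + 1)).reverse = cs[n] :: (cs.take n).reverse := by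
      rw [List.take_succ_eq_append_getElem hn', List.reverse_append]; simp
    rw [pvSkip, hget, htk]
    by_cases hq : q cs[n] = true
    · rw [if_pos ⟨by push_cast; omega, by simp [hq]⟩]
      have h2 : ((n + 1 : Nat) : Int) - 1 - 1 = (n : Int) - 1 := by push_cast; ring
      rw [h2, ih (le_of_lt hn')]
      rw [List.takeWhile_cons_of_pos hq]
      simp only [List.length_cons]
      push_cast; ring
    · rw [if_neg (by simp [hq])]
      rw [List.takeWhile_cons_of_neg (by simp [hq])]
      simp

theorem pvTakeWhile_len_le (q : Char → Bool) (l : List Char) :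
    (l.takeWhile q).length ≤ l.length := by
  simpa using List.IsPrefix.length_le (List.takeWhile_prefix q)

-- dropping the matched run from the reversed prefix is shortening the prefix
theorem pvDropWhile_rev_take (cs : List Char) (q : Char → Bool) (n : Nat) (hn : n ≤ cs.length) :
    (cs.take n).reverse.dropWhile q
      = (cs.take (n - ((cs.take n).reverse.takeWhile q).length)).reverse := by
  set r := (cs.take n).reverse with hr
  set k := (r.takeWhile q).length with hk
  have h1 : r.dropWhile q = r.drop k := by
    conv_rhs => rw [← List.takeWhile_append_dropWhile (p := q) (l := r)]
    rw [hk, List.drop_left]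
  have hlen : (cs.take n).length = n := by simp [Nat.min_eq_left hn]
  have hkn : k ≤ n := le_trans (pvTakeWhile_len_le q r) (by simp [hr, hlen])
  rw [h1, hr, List.drop_reverse, hlen, List.take_take, Nat.min_eq_left (by omega)]

theorem pvEndswith_concat (l : List Char) (a b : Char) :
    PySem.Chars.endswith (l ++ [a]) [b] = (a == b) := by
  by_cases h : a = b
  · subst h
    have : [a] <:+ l ++ [a] := ⟨l, rfl⟩
    simp [(PySem.Chars.endswith_iff _ _).mpr this]
  · have : ¬ ([b] <:+ l ++ [a]) := by
      rintro ⟨t, ht⟩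
      have := congrArg (fun x => x.getLast?) ht
      simp at this
      exact h this.symm
    have h2 : PySem.Chars.endswith (l ++ [a]) [b] = false := by
      cases he : PySem.Chars.endswith (l ++ [a]) [b]
      · rfl
      · exact absurd ((PySem.Chars.endswith_iff _ _).mp he) this
    rw [h2, eq_comm, beq_eq_false_iff_ne]
    exact h

theorem pvIdent_of_lower (x c : Char) (hc : PySem.Chars.islower c = true)
    (h : PySem.Chars.lowerChar x = c) : pvIsIdentA x = true := by
  unfold pvIsIdentA PySem.Chars.isalnum PySem.Chars.isalpha
  unfold PySem.Chars.lowerChar at h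
  by_cases hu : PySem.Chars.isupper x = true
  · simp [hu]
  · rw [if_neg hu] at h
    subst h
    simp [hc]

-- the heart: the maximal identifier lower-cases to "ruby" iff the last four characters do
-- and the character before them (if any) is not an identifier character
theorem pvCore (l : List Char) :
    (List.map PySem.Chars.lowerChar (l.takeWhile pvIsIdentA) = ['y','b','u','r'])
    ↔ (List.map PySem.Chars.lowerChar (l.take 4) = ['y','b','u','r'] ∧
        ¬ (5 ≤ l.length ∧ (l[4]?.any pvIsIdentA) = true)) := by
  constructor
  · intro h
    have hlen4 : (l.takeWhile pvIsIdentA).length = 4 := by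
      have := congrArg List.length h; simpa using this
    have htake : l.take 4 = l.takeWhile pvIsIdentA := by
      have := List.prefix_iff_eq_take.mp (List.takeWhile_prefix (l := l) pvIsIdentA)
      rw [hlen4] at this
      exact this.symm
    refine ⟨by rw [htake]; exact h, ?_⟩
    rintro ⟨h5, hb⟩
    have hl4 : l[4]? = (l.dropWhile pvIsIdentA)[0]? := by
      conv_lhs => rw [← List.takeWhile_append_dropWhile (p := pvIsIdentA) (l := l)]
      rw [List.getElem?_append_right (by simp [hlen4]), hlen4]
    cases hd : l.dropWhile pvIsIdentA with
    | nil =>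
      have := congrArg List.length (List.takeWhile_append_dropWhile (p := pvIsIdentA) (l := l))
      rw [List.length_append, hlen4, hd] at this
      simp at this
      omega
    | cons e es =>
      have hne : l.dropWhile pvIsIdentA ≠ [] := by simp [hd]
      have hpe := List.head_dropWhile_not (p := pvIsIdentA) (l := l) hne
      simp only [hd, List.head_cons] at hpe
      rw [hl4, hd] at hb
      simp at hb
      simp [hpe] at hb
  · rintro ⟨h1, h2⟩
    rcases l with _ | ⟨a, l⟩
    · simp at h1
    rcases l with _ | ⟨b, l⟩
    · simp at h1
    rcases l with _ | ⟨c, l⟩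
    · simp at h1
    rcases l with _ | ⟨d, rest⟩
    · simp at h1
    have ht4 : (a::b::c::d::rest).take 4 = [a,b,c,d] := rfl
    rw [ht4] at h1
    simp at h1
    obtain ⟨hA, hB, hC, hD⟩ := h1
    have ia := pvIdent_of_lower a 'y' (by decide) hA
    have ib := pvIdent_of_lower b 'b' (by decide) hB
    have ic := pvIdent_of_lower c 'u' (by decide) hC
    have id' := pvIdent_of_lower d 'r' (by decide) hD
    cases rest with
    | nil => simp [ia, ib, ic, id', hA, hB, hC, hD]
    | cons e es =>
      have h5 : 5 ≤ (a::b::c::d::e::es).length := by simp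
      have hge : (a::b::c::d::e::es)[4]? = some e := rfl
      have hne : pvIsIdentA e = false := by
        by_contra hcon
        rw [Bool.not_eq_false] at hcon
        exact h2 ⟨h5, by rw [hge]; simpa using hcon⟩
      simp [ia, ib, ic, id', hne, hA, hB, hC, hD]

theorem pvFinal (l : List Char) :
    ((PySem.Chars.lower ((l.takeWhile pvIsIdentA).reverse) == "ruby".toList) : Bool)
    = ((PySem.Chars.lower ((l.take 4).reverse) == "ruby".toList)
        && !(decide (5 ≤ l.length) && (l[4]?.any pvIsIdentA))) := by
  have h1 : ∀ t : List Char,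
      (PySem.Chars.lower t.reverse == "ruby".toList)
        = (List.map PySem.Chars.lowerChar t == ['y','b','u','r']) := by
    intro t
    show ((List.map PySem.Chars.lowerChar t.reverse) == _) = _
    rw [List.map_reverse, Bool.eq_iff_iff, beq_iff_eq, beq_iff_eq, List.reverse_eq_iff]
    rw [show ("ruby".toList).reverse = ['y','b','u','r'] from by decide]
  rw [h1, h1, Bool.eq_iff_iff]
  simp only [beq_iff_eq, Bool.and_eq_true, Bool.not_eq_true', Bool.and_eq_false_iff,
    decide_eq_false_iff_not]
  rw [pvCore]
  constructor
  · rintro ⟨ha, hb⟩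
    refine ⟨ha, ?_⟩
    by_cases h5 : 5 ≤ l.length
    · right
      cases hy : l[4]?.any pvIsIdentA
      · rfl
      · exact absurd ⟨h5, hy⟩ hb
    · left; exact h5
  · rintro ⟨ha, hb⟩
    refine ⟨ha, ?_⟩
    rintro ⟨h5, hy⟩
    rcases hb with hb | hb
    · exact hb h5
    · rw [hb] at hy; exact Bool.false_ne_true hy

-- ===== VERDICT (by name: the statement is the Claim_ definition above) =====
theorem dbs_ruby_arg_context_py_spec : Claim_equal_dbs_ruby_arg_context_py := by
  intro text entry _hdom
  unfold Spec_dbs_ruby_arg_context_py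
  simp only [dbs_ruby_arg_context_py, dbs_ruby_arg_context_py_alt, pvIntValue]
  set cs := text.toList with hcs
  set s0 := PySem.Dict.getD (PySem.Dict.mk entry) "span_start" (-1) with hs0
  by_cases hg : 0 ≤ s0 ∧ s0 < (cs.length : Int)
  case neg =>
    rw [if_pos (by omega : s0 < 0 ∨ (cs.length : Int) ≤ s0), if_pos hg]
  case pos =>
    rw [if_neg (by omega : ¬ (s0 < 0 ∨ (cs.length : Int) ≤ s0)), if_neg (not_not_intro hg)]
    obtain ⟨n, hsn, hnlen⟩ : ∃ n : Nat, s0 = (n : Int) ∧ n < cs.length :=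
      ⟨s0.toNat, by omega, by omega⟩
    rw [hsn]
    have hfun : (fun c => c == ' ' || c == '\t') = pvIsWsA := rfl
    -- first whitespace walk
    have hsk1 := pvSkip_spec cs pvIsWsA n (le_of_lt hnlen)
    set k1 := ((cs.take n).reverse.takeWhile pvIsWsA).length with hk1
    have hk1n : k1 ≤ n := by
      calc k1 ≤ (cs.take n).reverse.length := pvTakeWhile_len_le _ _
        _ ≤ n := by simp
    set m1 := n - k1 with hm1
    have hi1 : pvSkip cs pvIsWsA ((n : Int) - 1) = (m1 : Int) - 1 := by rw [hsk1]; omega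
    have hdw1 : (cs.take n).reverse.dropWhile pvIsWsA = (cs.take m1).reverse :=
      pvDropWhile_rev_take cs pvIsWsA n (le_of_lt hnlen)
    have hp0 : pvRstripWT (PySem.List.slice cs none (some (n : Int))) = cs.take m1 := by
      unfold pvRstripWT
      rw [PySem.List.slice_to_natCast, hfun, hdw1, List.reverse_reverse]
    rw [hi1, hp0]
    have hm1le : m1 ≤ cs.length := by omega
    have hlen_take : (cs.take m1).length = m1 := by simp [Nat.min_eq_left hm1le]
    rcases hm : (cs.take m1).reverse with _ | ⟨c, rest⟩
    · -- empty prefix after stripping: both sides bail out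
      have hm0 : m1 = 0 := by
        have := congrArg List.length hm
        simpa [hlen_take] using this
      have hp0nil : cs.take m1 = [] := by
        rw [← List.reverse_reverse (cs.take m1), hm]; rfl
      rw [hp0nil, if_pos (Or.inl (by omega)), if_pos (by decide)]
    · have hconc : cs.take m1 = rest.reverse ++ [c] := by
        rw [← List.reverse_reverse (cs.take m1), hm]; simp
      have hm1r : m1 = rest.length + 1 := by
        have := congrArg List.length hconc
        simp [hlen_take] at this
        omega
      have hgetc : PySem.List.pyGet? cs ((m1 : Int) - 1) = some c := by
        rw [show (m1 : Int) - 1 = ((rest.length : Nat) : Int) from by omega,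
          PySem.List.pyGet?_natCast]
        have h1 : cs[rest.length]? = (cs.take m1)[rest.length]? := by
          rw [List.getElem?_take_of_lt (by omega)]
        rw [h1, hconc, show rest.length = rest.reverse.length from by simp]
        exact List.getElem?_concat_length
      rw [hgetc, hconc, pvEndswith_concat]
      simp only [Option.any_some]
      by_cases hc : c = '('
      · subst hc
        rw [if_neg (by simp; omega), if_neg (by simp)]
        -- second whitespace walk
        have hsk2 := pvSkip_spec cs pvIsWsA rest.length (by omega)
        have htrest : cs.take rest.length = rest.reverse := by
          have h1 : cs.take rest.length = (cs.take m1).take rest.length := by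
            rw [List.take_take, Nat.min_eq_left (by omega)]
          rw [h1, hconc]
          exact List.take_left' (by simp)
        rw [htrest, List.reverse_reverse] at hsk2
        set k2 := (rest.takeWhile pvIsWsA).length with hk2
        have hk2r : k2 ≤ rest.length := pvTakeWhile_len_le _ _
        set m2 := rest.length - k2 with hm2
        have hi2 : pvSkip cs pvIsWsA ((m1 : Int) - 1 - 1) = (m2 : Int) - 1 := by
          rw [show (m1 : Int) - 1 - 1 = ((rest.length : Nat) : Int) - 1 from by omega, hsk2]
          omega
        rw [hi2]
        have hdw2 : rest.dropWhile pvIsWsA = (cs.take m2).reverse := by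
          have h := pvDropWhile_rev_take cs pvIsWsA rest.length (by omega)
          rw [htrest, List.reverse_reverse] at h
          exact h
        have hdl : PySem.List.slice (rest.reverse ++ ['(']) none (some (-1)) = rest.reverse := by
          rw [PySem.List.slice_to_neg_one]
          exact List.dropLast_concat
        rw [hdl]
        have hp : pvRstripWT rest.reverse = cs.take m2 := by
          unfold pvRstripWT
          rw [List.reverse_reverse, hfun, hdw2, List.reverse_reverse]
        rw [hp]
        -- identifier walk
        have hm2le : m2 ≤ cs.length := by omega
        have hlen2 : (cs.take m2).length = m2 := by simp [Nat.min_eq_left hm2le]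
        have hsk3 := pvSkip_spec cs pvIsIdentA m2 hm2le
        set k3 := ((cs.take m2).reverse.takeWhile pvIsIdentA).length with hk3
        have hk3m : k3 ≤ m2 := by
          calc k3 ≤ (cs.take m2).reverse.length := pvTakeWhile_len_le _ _
            _ ≤ m2 := by simp
        rw [hsk3]
        have hsliceA : PySem.List.slice cs (some ((m2 : Int) - 1 - (k3 : Int) + 1))
            (some ((m2 : Int) - 1 + 1)) = ((cs.take m2).reverse.takeWhile pvIsIdentA).reverse := by
          rw [show (m2 : Int) - 1 - (k3 : Int) + 1 = ((m2 - k3 : Nat) : Int) from by omega,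
            show (m2 : Int) - 1 + 1 = (m2 : Int) from by ring,
            PySem.List.slice_natCast, show m2 - (m2 - k3) = k3 from by omega]
          have h3 : (cs.take m2).reverse.takeWhile pvIsIdentA = (cs.take m2).reverse.take k3 := by
            rw [hk3]
            exact List.prefix_iff_eq_take.mp (List.takeWhile_prefix _)
          have h1 : (cs.take m2).reverse.take k3 = ((cs.take m2).drop (m2 - k3)).reverse := by
            rw [List.take_reverse, hlen2]
          have h2 : (cs.take m2).drop (m2 - k3) = (cs.drop (m2 - k3)).take k3 := by
            rw [List.drop_take, show m2 - (m2 - k3) = k3 from by omega]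
          rw [h3, h1, List.reverse_reverse]
          exact h2.symm
        rw [hsliceA]
        -- B's tail expressions in terms of the reversed remainder
        have hBslice : PySem.List.slice (cs.take m2) (some (-4)) none
            = ((cs.take m2).reverse.take 4).reverse := by
          rw [PySem.List.slice_from_neg_ofNat _ 4 (by omega), List.take_reverse, hlen2,
            List.reverse_reverse]
        rw [hBslice]
        have hBA : pvIsIdentB = pvIsIdentA := rfl
        have hBget : (decide (5 ≤ (cs.take m2).length)
              && ((PySem.List.pyGet? (cs.take m2) (-5)).any pvIsIdentB))
            = (decide (5 ≤ (cs.take m2).reverse.length)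
              && (((cs.take m2).reverse)[4]?.any pvIsIdentA)) := by
          rw [hBA, List.length_reverse]
          by_cases h5 : 5 ≤ (cs.take m2).length
          · rw [PySem.List.pyGet?_neg_ofNat _ 5 (by omega) (by omega),
              List.getElem?_reverse (by omega), show (cs.take m2).length - 1 - 4
                = (cs.take m2).length - 5 from by omega]
          · rw [decide_eq_false h5]
            simp
        rw [hBget]
        exact pvFinal ((cs.take m2).reverse)
      · -- not an opening parenthesis: both sides bail out
        rw [if_pos (Or.inr (by simp [hc])), if_pos (by simp; exact hc)]
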